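-- pv_equiv track=rewrite | github.com/MrDarklake/Algorithm-Studies | Algorithm-Studies/python_lab/index_sozluk.py | index_sozluk
-- ===== SOURCE A (Python) =====
-- def index_sozluk (liste):
--     index_sozlugu = {}
--     index_sirasi = 0
--     for i in liste:
--         for j in range(len(i)):
--             if j not in index_sozlugu:
--                 index_sozlugu[j] = [i[j]]
--             else:
--                 index_sozlugu[j].append(i[j])
--     return index_sozlugu
-- ===== SOURCE B (Python) =====
-- def index_sozluk(liste):
--     # column-major gathering: one comprehension per column index
--     if not liste:
--         return {}
--     maxlen = max(len(row) for row in liste)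
--     return {j: [row[j] for row in liste if len(row) > j] for j in range(maxlen)}
-- ===== Notes on version B (the rewrite author's own statement) =====
-- stated objective: simpler
-- what changed: Replaces A's row-major incremental insert-or-append into a dict with a direct column-major build: compute maxlen once and construct each column bucket with one comprehension per index.
import Mathlib
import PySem

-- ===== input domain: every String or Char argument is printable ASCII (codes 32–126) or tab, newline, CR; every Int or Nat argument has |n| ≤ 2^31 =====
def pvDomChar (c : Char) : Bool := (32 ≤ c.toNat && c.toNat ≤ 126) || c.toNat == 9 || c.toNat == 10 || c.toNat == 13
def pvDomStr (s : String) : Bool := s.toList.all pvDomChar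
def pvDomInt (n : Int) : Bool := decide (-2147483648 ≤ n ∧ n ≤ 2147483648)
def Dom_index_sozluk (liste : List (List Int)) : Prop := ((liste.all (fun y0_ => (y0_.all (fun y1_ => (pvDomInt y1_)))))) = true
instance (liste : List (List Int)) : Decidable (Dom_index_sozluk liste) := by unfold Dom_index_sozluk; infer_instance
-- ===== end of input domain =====

-- B gathers each column bucket directly (column-major comprehension over range(maxlen))
-- instead of A's row-major incremental insert-or-append into the dict; objective: simpler.

-- ===== PORT A =====
-- row-major: for each row i, for each j in range(len(i)), insert-or-append into the dict.
-- i[j] is ported as pyGetD (exact here: j ∈ range(len(i)) is always in range, so Python never raises).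
def index_sozluk (liste : List (List Int)) : List (Int × List Int) :=
  (liste.foldl
    (fun d i =>
      (PySem.List.pyRange 0 (i.length : Int) 1).foldl
        (fun d j =>
          if d.contains j = false then d.insert j [PySem.List.pyGetD i j 0]
          else d.modify j [] (fun v => v ++ [PySem.List.pyGetD i j 0]))
        d)
    PySem.Dict.empty).items

-- ===== PORT B =====
-- column-major: maxlen = max(len(row) for row in liste), then one bucket per j in range(maxlen).
-- row[j] is ported as pyGetD (exact here: the filter guarantees j < len(row), so Python never raises).
def index_sozluk_alt (liste : List (List Int)) : List (Int × List Int) :=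
  if liste = [] then []
  else
    let maxlen : Int :=
      (PySem.List.max? (liste.map (fun row => (row.length : Int))) (fun x => x)).getD 0
    (PySem.List.pyRange 0 maxlen 1).map
      (fun j =>
        (j, (liste.filter (fun row => decide (j < (row.length : Int)))).map
              (fun row => PySem.List.pyGetD row j 0)))

-- ===== PRECONDITION & SPEC =====
def Spec_index_sozluk (liste : List (List Int)) (out : List (Int × List Int)) : Prop := out = index_sozluk_alt liste
instance (liste : List (List Int)) (out : List (Int × List Int)) : Decidable (Spec_index_sozluk liste out) := by unfold Spec_index_sozluk; infer_instance

-- ===== CLAIM (what is proved, stated in full; the proofs are below) =====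
def Claim_equal_index_sozluk : Prop := ∀ (liste : List (List Int)), Dom_index_sozluk liste → Spec_index_sozluk liste (index_sozluk liste)

-- ===== LEMMAS AND PROOFS =====

-- the column bucket for index c
def pvCol (liste : List (List Int)) (c : Int) : List Int :=
  (liste.filter (fun row => decide (c < (row.length : Int)))).map
    (fun row => PySem.List.pyGetD row c 0)

-- running maximum of the row lengths
def pvMaxLen (liste : List (List Int)) : Nat :=
  liste.foldl (fun a r => max a r.length) 0

-- A's dict before taking .items
def pvDictA (liste : List (List Int)) : PySem.Dict Int (List Int) :=
  liste.foldl
    (fun d i =>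
      (PySem.List.pyRange 0 (i.length : Int) 1).foldl
        (fun d j =>
          if d.contains j = false then d.insert j [PySem.List.pyGetD i j 0]
          else d.modify j [] (fun v => v ++ [PySem.List.pyGetD i j 0]))
        d)
    PySem.Dict.empty

lemma pvDictA_eq_items : index_sozluk = fun liste => (pvDictA liste).items := rfl

-- A's insert-or-append branch is exactly one modify
lemma pvBranch (d : PySem.Dict Int (List Int)) (j : Int) (v : Int) :
    (if d.contains j = false then d.insert j [v]
     else d.modify j [] (fun w => w ++ [v]))
    = d.modify j [] (fun w => w ++ [v]) := by
  by_cases h : d.contains j = false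
  · simp [h, PySem.Dict.modify, PySem.Dict.getD_of_not_contains d [] h]
  · simp [h]

lemma pvStep_eq (d : PySem.Dict Int (List Int)) (i : List Int) :
    (PySem.List.pyRange 0 (i.length : Int) 1).foldl
      (fun d j =>
        if d.contains j = false then d.insert j [PySem.List.pyGetD i j 0]
        else d.modify j [] (fun v => v ++ [PySem.List.pyGetD i j 0])) d
    = (PySem.List.pyRange 0 (i.length : Int) 1).foldl
        (fun d j => d.modify j [] (fun v => v ++ [PySem.List.pyGetD i j 0])) d :=
  PySem.List.foldl_congr_mem _ _ _ _ (fun acc x _ => pvBranch acc x (PySem.List.pyGetD i x 0))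

lemma pvFilter_range (m : Nat) (c : Int) :
    ((List.range m).map (fun k : Nat => (k : Int))).filter (fun j => j == c)
    = if 0 ≤ c ∧ c < (m : Int) then [c] else [] := by
  induction m with
  | zero => simp
  | succ m ih =>
    rw [List.range_succ, List.map_append, List.filter_append, ih]
    by_cases hm : (m : Int) = c
    · have h2 : 0 ≤ c ∧ c < ((m + 1 : Nat) : Int) := by push_cast; omega
      simp [hm, h2]
    · have h2 : (0 ≤ c ∧ c < ((m + 1 : Nat) : Int)) ↔ (0 ≤ c ∧ c < (m : Int)) := by
        push_cast; omega
      have h3 : List.filter (fun j => j == c) (List.map (fun k : Nat => (k : Int)) [m]) = [] := by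
        simp [hm]
      rw [h3, List.append_nil, if_congr h2 rfl rfl]

lemma pvGetD_step (d : PySem.Dict Int (List Int)) (i : List Int) (c : Int) :
    ((PySem.List.pyRange 0 (i.length : Int) 1).foldl
        (fun d j => d.modify j [] (fun v => v ++ [PySem.List.pyGetD i j 0])) d).getD c []
    = d.getD c [] ++ (if 0 ≤ c ∧ c < (i.length : Int) then [PySem.List.pyGetD i c 0] else []) := by
  have h := PySem.Dict.getD_foldl_modify_append
    ((PySem.List.pyRange 0 (i.length : Int) 1).map (fun j => (j, PySem.List.pyGetD i j 0))) d c
  rw [List.foldl_map] at h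
  rw [h, List.filter_map, List.map_map, PySem.List.pyRange_zero_natCast]
  rw [show ((fun (p : Int × Int) => p.1 == c) ∘ fun j => (j, PySem.List.pyGetD i j 0)) =
        (fun j : Int => j == c) from rfl]
  rw [show ((fun (p : Int × Int) => p.2) ∘ fun j => (j, PySem.List.pyGetD i j 0)) =
        (fun j : Int => PySem.List.pyGetD i j 0) from rfl]
  rw [pvFilter_range]
  by_cases h0 : 0 ≤ c ∧ c < (i.length : Int) <;> simp [h0]

lemma pvSet_update_range (a b : Nat) :
    PySem.Set.update ((List.range a).map (fun k : Nat => (k : Int)))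
      ((List.range b).map (fun k : Nat => (k : Int)))
    = (List.range (max a b)).map (fun k : Nat => (k : Int)) := by
  induction b with
  | zero => simp [PySem.Set.update]
  | succ b ih =>
    rw [List.range_succ, List.map_append, List.map_singleton]
    have hupd : PySem.Set.update ((List.range a).map (fun k : Nat => (k : Int)))
        (((List.range b).map (fun k : Nat => (k : Int))) ++ [(b : Int)])
        = PySem.Set.add (PySem.Set.update ((List.range a).map (fun k : Nat => (k : Int)))
            ((List.range b).map (fun k : Nat => (k : Int)))) (b : Int) := by
      simp [PySem.Set.update, List.foldl_append]
    rw [hupd, ih]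
    by_cases hb : b < max a b
    · have hmem : (b : Int) ∈ (List.range (max a b)).map (fun k : Nat => (k : Int)) := by
        simp; omega
      have hmax : max a (b + 1) = max a b := by omega
      simp [PySem.Set.add, hmax]
      omega
    · have hab : max a b = b := by omega
      have hmax : max a (b + 1) = b + 1 := by omega
      simp [PySem.Set.add, hab, hmax, List.range_succ]

lemma pvStepA (rows : List (List Int)) (r : List Int) :
    pvDictA (rows ++ [r]) =
      (PySem.List.pyRange 0 (r.length : Int) 1).foldl
        (fun d j => d.modify j [] (fun v => v ++ [PySem.List.pyGetD r j 0])) (pvDictA rows) := by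
  simp only [pvDictA, List.foldl_append, List.foldl_cons, List.foldl_nil]
  exact pvStep_eq _ r

lemma pvKeys_dictA (liste : List (List Int)) :
    (pvDictA liste).keys = (List.range (pvMaxLen liste)).map (fun k : Nat => (k : Int)) := by
  induction liste using List.reverseRecOn with
  | nil => simp [pvDictA, pvMaxLen]
  | append_singleton rows r ih =>
    rw [pvStepA, PySem.Dict.keys_foldl_modify_key (key := fun j => j)
      (f := fun _ j => (fun v => v ++ [PySem.List.pyGetD r j 0])), List.map_id', ih,
      PySem.List.pyRange_zero_natCast, pvSet_update_range]
    have : pvMaxLen (rows ++ [r]) = max (pvMaxLen rows) r.length := by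
      simp [pvMaxLen, List.foldl_append]
    rw [this]

lemma pvGetD_dictA (liste : List (List Int)) (c : Int) (hc : 0 ≤ c) :
    (pvDictA liste).getD c [] = pvCol liste c := by
  induction liste using List.reverseRecOn with
  | nil => simp [pvDictA, pvCol]
  | append_singleton rows r ih =>
    rw [pvStepA, pvGetD_step, ih]
    simp only [pvCol, List.filter_append, List.map_append]
    by_cases h : c < (r.length : Int)
    · simp [h, hc]
    · simp [h]

lemma pvFoldl_max_cast (t : List (List Int)) (n : Nat) :
    ((t.foldl (fun a r => max a r.length) n : Nat) : Int)
      = t.foldl (fun a r => max a (r.length : Int)) (n : Int) := by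
  induction t generalizing n with
  | nil => rfl
  | cons y t ih =>
    simp only [List.foldl_cons]
    rw [ih, Nat.cast_max]

-- ===== VERDICT (by name: the statement is the Claim_ definition above) =====
theorem index_sozluk_spec : Claim_equal_index_sozluk := by
  intro liste _
  unfold Spec_index_sozluk index_sozluk_alt
  by_cases hl : liste = []
  · subst hl
    rfl
  · rw [if_neg hl]
    obtain ⟨x, t, rfl⟩ := List.exists_cons_of_ne_nil hl
    have hmax : (PySem.List.max? ((x :: t).map (fun row => (row.length : Int)))
        (fun x => x)).getD 0 = ((pvMaxLen (x :: t)) : Int) := by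
      rw [List.map_cons, PySem.List.max?_id_cons, Option.getD_some, List.foldl_map]
      have : pvMaxLen (x :: t) = t.foldl (fun a r => max a r.length) x.length := by
        simp [pvMaxLen]
      rw [this, pvFoldl_max_cast]
    rw [hmax, pvDictA_eq_items]
    simp only
    have hnd : (pvDictA (x :: t)).keys.Nodup := by
      rw [pvKeys_dictA]
      exact List.Nodup.map (fun a b hab => by exact_mod_cast hab) List.nodup_range
    rw [PySem.Dict.items_eq_map_keys _ hnd [], pvKeys_dictA, PySem.List.pyRange_zero_natCast]
    apply List.map_congr_left
    intro j hj
    obtain ⟨k, _, rfl⟩ := List.mem_map.mp hj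
    rw [pvGetD_dictA _ _ (by positivity)]
    rfl
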